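-- pv_equiv track=rewrite | github.com/jiyoungzero/2023-Codingtest-Study | jiyoung풀이/PGS문제/pgs_리코쳇로봇.py | solution
-- ===== SOURCE A (Python) =====
-- from collections import deque
--
-- def solution(board):
--     answer = 0
--     dx, dy = [0,0,1,-1],[1,-1,0,0]
--     s_x, s_y = 0,0
--     r, c = len(board), len(board[0])
--     flag = False
--     visited = [[0] * c for _ in range(r)]
--     # 시작점 찾기
--     for i in range(r):
--         for j in range(c):
--             if board[i][j] == "R":
--                 s_x, s_y = i, j
--                 break
--
--     def bfs():
--         que = deque()
--         que.append((s_x, s_y))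
--         visited[s_x][s_y] = 1
--
--
--         while que:
--             x, y = que.popleft()
--             if board[x][y] == "G":
--                 flag = True
--                 return visited[x][y]
--
--             for k in range(4):
--                 nx, ny = x, y
--                 while True:
--                     nx += dx[k]
--                     ny += dy[k]
--                     if 0<=nx<r and 0<=ny<c and board[nx][ny] == "D":
--                         nx -= dx[k]
--                         ny -= dy[k]
--                         break
--                     elif 0>nx or r<=nx or 0>ny or c<=ny:
--                         nx -= dx[k]
--                         ny -= dy[k]
--                         break
--                 if not visited[nx][ny]:
--                     visited[nx][ny] = visited[x][y] + 1
--                     que.append((nx,ny))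
--         return -1
--
--     answer = bfs()
--
--     return answer-1 if answer > 0 else -1
-- ===== SOURCE B (Python) =====
-- from collections import deque
--
--
-- def _fwd(line):
--     # stop[i] = index where a slide in the increasing direction from i halts
--     # (just before the first 'D' after i, or at the far wall). One O(n) scan.
--     n = len(line)
--     d = []
--     cur = n - 1
--     for i in reversed(range(n)):
--         if i + 1 < n and line[i + 1] == 'D':
--             cur = i
--         d.append(cur)
--     d.reverse()
--     return d
--
--
-- def _bwd(line):
--     # stop[i] for a slide in the decreasing direction.
--     n = len(line)
--     d = []
--     cur = 0
--     for i in range(n):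
--         if i >= 1 and line[i - 1] == 'D':
--             cur = i
--         d.append(cur)
--     return d
--
--
-- def solution(board):
--     r, c = len(board), len(board[0])
--     s_x, s_y = 0, 0
--     for i, row in enumerate(board):
--         for j, ch in enumerate(row):
--             if ch == 'R':
--                 s_x, s_y = i, j
--                 break
--     # Precompute slide destinations for every cell and direction, one scan per line.
--     right = [_fwd(row) for row in board]
--     left = [_bwd(row) for row in board]
--     cols = ["".join(row[j] for row in board) for j in range(c)]
--     down = [_fwd(col) for col in cols]
--     up = [_bwd(col) for col in cols]
--     visited = [[0] * c for _ in range(r)]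
--     visited[s_x][s_y] = 1
--     que = deque([(s_x, s_y)])
--     ans = -1
--     while que:
--         x, y = que.popleft()
--         if board[x][y] == 'G':
--             ans = visited[x][y]
--             break
--         for k in range(4):
--             if k == 0:
--                 nx, ny = x, right[x][y]
--             elif k == 1:
--                 nx, ny = x, left[x][y]
--             elif k == 2:
--                 nx, ny = down[y][x], y
--             else:
--                 nx, ny = up[y][x], y
--             if not visited[nx][ny]:
--                 visited[nx][ny] = visited[x][y] + 1
--                 que.append((nx, ny))
--     return ans - 1 if ans > 0 else -1
-- ===== Notes on version B (the rewrite author's own statement) =====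
-- stated objective: alternative
-- what changed: A re-walks the board cell by cell inside every BFS expansion (each of the 4 moves loops until a wall); B precomputes, with one linear scan per row and per column, a slide-destination table for all four directions and then runs the same BFS with table-lookup moves.
-- outside the precondition, e.g. on solution(['G', 'XR']): A returns 0, B raises IndexError
import Mathlib
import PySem

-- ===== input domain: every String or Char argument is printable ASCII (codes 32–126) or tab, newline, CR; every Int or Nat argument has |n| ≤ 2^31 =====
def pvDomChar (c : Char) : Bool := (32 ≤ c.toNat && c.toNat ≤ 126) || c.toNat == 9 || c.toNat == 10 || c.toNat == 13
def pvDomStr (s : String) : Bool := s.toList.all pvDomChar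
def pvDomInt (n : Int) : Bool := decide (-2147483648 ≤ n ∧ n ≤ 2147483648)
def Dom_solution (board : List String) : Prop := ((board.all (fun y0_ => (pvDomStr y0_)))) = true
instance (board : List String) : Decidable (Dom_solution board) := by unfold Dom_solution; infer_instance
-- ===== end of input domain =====

-- B replaces A's per-move cell-by-cell slide loops by slide-destination tables
-- precomputed with one linear scan per row and per column; the BFS then looks each
-- move up in the tables instead of re-walking the board (alternative algorithm; not
-- measured faster on the generated inputs). Neither program mutates its argument.

-- ===== PORT A =====

-- board[x][y] / visited[x][y]: the defaults are unreachable on inputs admitted by Pre_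
def pvGet2 (b : List (List Char)) (x y : Int) : Char :=
  PySem.List.pyGetD (PySem.List.pyGetD b x []) y ' '

def pvGet2I (v : List (List Int)) (x y : Int) : Int :=
  PySem.List.pyGetD (PySem.List.pyGetD v x []) y 0

-- visited[x][y] = val
def pvSet2 (v : List (List Int)) (x y val : Int) : List (List Int) :=
  PySem.List.pySetD v x (PySem.List.pySetD (PySem.List.pyGetD v x []) y val)

-- A's inner 'while True' slide; fuel only totalizes it (r+c+2 steps always suffice)
def slideA (b : List (List Char)) (r c : Nat) (dx dy : Int) : Int → Int → Nat → Int × Int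
  | x, y, 0 => (x, y)
  | x, y, fuel+1 =>
    let nx := x + dx
    let ny := y + dy
    if 0 ≤ nx ∧ nx < (r:Int) ∧ 0 ≤ ny ∧ ny < (c:Int) ∧ pvGet2 b nx ny = 'D' then (x, y)
    else if nx < 0 ∨ (r:Int) ≤ nx ∨ ny < 0 ∨ (c:Int) ≤ ny then (x, y)
    else slideA b r c dx dy nx ny fuel

def moveA (b : List (List Char)) (r c : Nat) (x y k : Int) : Int × Int :=
  let dx : List Int := [0, 0, 1, -1]
  let dy : List Int := [1, -1, 0, 0]
  slideA b r c (PySem.List.pyGetD dx k 0) (PySem.List.pyGetD dy k 0) x y (r + c + 2)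

-- the 'for k in range(4): … if not visited[nx][ny]: …' body of the BFS loop
def bfsStep (move : Int → Int → Int → Int × Int) (x y : Int)
    (st : List (Int × Int) × List (List Int)) (k : Int) :
    List (Int × Int) × List (List Int) :=
  let p := move x y k
  if pvGet2I st.2 p.1 p.2 = 0 then
    (st.1 ++ [p], pvSet2 st.2 p.1 p.2 (pvGet2I st.2 x y + 1))
  else st

-- the BFS 'while que:' loop, shared driver: A passes its slide as 'move', B its table
-- lookup; fuel only totalizes it (r*c+1 iterations always suffice: every enqueue
-- marks a previously unvisited cell)
def bfsLoop (b : List (List Char)) (move : Int → Int → Int → Int × Int) :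
    List (Int × Int) → List (List Int) → Nat → Int
  | _, _, 0 => -1
  | [], _, _+1 => -1
  | (x, y) :: rest, visited, fuel+1 =>
    if pvGet2 b x y = 'G' then pvGet2I visited x y
    else
      let st := (PySem.List.pyRange 0 4 1).foldl (bfsStep move x y) (rest, visited)
      bfsLoop b move st.1 st.2 fuel

-- A's start scan: 'for i in range(r): for j in range(c): if board[i][j]=="R": … break'
def startA (b : List (List Char)) (r c : Nat) : Int × Int :=
  (PySem.List.pyRange 0 (r:Int) 1).foldl (fun s i =>
    match (PySem.List.pyRange 0 (c:Int) 1).foldl (fun acc j =>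
        if acc = none ∧ pvGet2 b i j = 'R' then some j else acc) (none : Option Int) with
    | some j => (i, j)
    | none => s) ((0:Int), (0:Int))

def solution (board : List String) : Int :=
  let b := board.map String.toList
  let r := b.length
  let c := (PySem.List.pyGetD b 0 []).length   -- len(board[0]); IndexError on [] excluded by Pre_
  let s := startA b r c
  let visited := pvSet2 (List.replicate r (List.replicate c 0)) s.1 s.2 1
  let ans := bfsLoop b (moveA b r c) [s] visited (r * c + 1)
  if ans > 0 then ans - 1 else -1

-- ===== PORT B =====

-- _fwd: append-then-reverse built exactly as in Source B
def fwdB (ln : List Char) : List Int :=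
  let n := ln.length
  let st := ((PySem.List.pyRange 0 (n:Int) 1).reverse).foldl
    (fun (st : Int × List Int) i =>
      let cur := if i + 1 < (n:Int) ∧ PySem.List.pyGetD ln (i + 1) ' ' = 'D' then i else st.1
      (cur, st.2 ++ [cur])) (((n:Int) - 1), ([] : List Int))
  st.2.reverse

-- _bwd
def bwdB (ln : List Char) : List Int :=
  let st := (PySem.List.pyRange 0 ((ln.length : Nat) : Int) 1).foldl
    (fun (st : Int × List Int) i =>
      let cur := if 1 ≤ i ∧ PySem.List.pyGetD ln (i - 1) ' ' = 'D' then i else st.1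
      (cur, st.2 ++ [cur])) ((0:Int), ([] : List Int))
  st.2

-- ''.join(row[j] for row in board)  (IndexError on short rows excluded by Pre_)
def colB (b : List (List Char)) (j : Int) : List Char :=
  b.map (fun row => PySem.List.pyGetD row j ' ')

-- B's start scan over enumerate(board)/enumerate(row)
def startB (b : List (List Char)) : Int × Int :=
  (PySem.List.enumerate b 0).foldl (fun s p =>
    match (PySem.List.enumerate p.2 0).foldl (fun acc q =>
        if acc = none ∧ q.2 = 'R' then some q.1 else acc) (none : Option Int) with
    | some j => (p.1, j)
    | none => s) ((0:Int), (0:Int))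

-- table lookup replacing A's slide loop
def moveB (right left down up : List (List Int)) (x y k : Int) : Int × Int :=
  if k = 0 then (x, pvGet2I right x y)
  else if k = 1 then (x, pvGet2I left x y)
  else if k = 2 then (pvGet2I down y x, y)
  else (pvGet2I up y x, y)

def solution_alt (board : List String) : Int :=
  let b := board.map String.toList
  let r := b.length
  let c := (PySem.List.pyGetD b 0 []).length
  let s := startB b
  let right := b.map fwdB
  let left := b.map bwdB
  let cols := (PySem.List.pyRange 0 (c:Int) 1).map (colB b)
  let down := cols.map fwdB
  let up := cols.map bwdB
  let visited := pvSet2 (List.replicate r (List.replicate c 0)) s.1 s.2 1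
  let ans := bfsLoop b (moveB right left down up) [s] visited (r * c + 1)
  if ans > 0 then ans - 1 else -1

-- ===== PRECONDITION & SPEC =====
-- Pre_ restricts to rectangular non-empty boards — the problem's natural domain:
-- elsewhere A raises IndexError (empty board, zero-width first row, a row shorter
-- than the first), and on rows longer than the first (whose tails A silently
-- ignores) B's whole-row scans can raise IndexError.
def Pre_solution (board : List String) : Prop :=
  board ≠ [] ∧ 0 < PySem.Str.len (board.headD "") ∧
  ∀ s ∈ board, PySem.Str.len s = PySem.Str.len (board.headD "")

instance (board : List String) : Decidable (Pre_solution board) := by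
  unfold Pre_solution; infer_instance

def pvWitness_solution : List String := ["R.D", ".DG", "..."]

def Spec_solution (board : List String) (out : Int) : Prop := out = solution_alt board
instance (board : List String) (out : Int) : Decidable (Spec_solution board out) := by
  unfold Spec_solution; infer_instance

-- ===== CLAIM (what is proved, stated in full; the proofs are below) =====
def Claim_equal_solution : Prop := ∀ (board : List String), Dom_solution board → Pre_solution board → Spec_solution board (solution board)

-- ===== LEMMAS AND PROOFS =====

-- in-range positions (proof-side only)
def InR (r c : Nat) (p : Int × Int) : Prop :=
  0 ≤ p.1 ∧ p.1 < (r:Int) ∧ 0 ≤ p.2 ∧ p.2 < (c:Int)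

-- where a slide in the increasing direction from y stops
def specFwd (ln : List Char) (y : Nat) : Int :=
  if _h : y + 1 < ln.length then
    (if getElem? ln (y+1) = some 'D' then (y:Int) else specFwd ln (y+1))
  else (ln.length : Int) - 1
termination_by ln.length - y

-- where a slide in the decreasing direction stops
def specBwd (ln : List Char) : Nat → Int
  | 0 => 0
  | y+1 => if getElem? ln y = some 'D' then ((y:Int)+1) else specBwd ln y

lemma specFwd_len (ln : List Char) : specFwd ln ln.length = (ln.length : Int) - 1 := by
  rw [specFwd, dif_neg (by omega)]

lemma step_fwd (ln : List Char) (k : Nat) (hk : k + 1 ≤ ln.length) :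
    (if (k:Int) + 1 < (ln.length:Int) ∧ PySem.List.pyGetD ln ((k:Int) + 1) ' ' = 'D'
      then (k:Int) else specFwd ln (k+1)) = specFwd ln k := by
  by_cases hlt : k + 1 < ln.length
  · have hcast : (k:Int) + 1 = ((k+1 : Nat) : Int) := by push_cast; ring
    conv_rhs => rw [specFwd]
    rw [dif_pos hlt, hcast, PySem.List.pyGetD_natCast, List.getD_eq_getElem ln ' ' hlt,
      List.getElem?_eq_getElem hlt]
    by_cases hD : ln[k+1] = 'D'
    · rw [if_pos ⟨by push_cast; omega, hD⟩, if_pos (by simp [hD])]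
    · rw [if_neg (fun hc => hD hc.2), if_neg (by simp [hD])]
  · have hk1 : k + 1 = ln.length := by omega
    rw [if_neg (by rintro ⟨h1, -⟩; exact hlt (by exact_mod_cast h1))]
    conv_lhs => rw [specFwd]
    conv_rhs => rw [specFwd]
    rw [dif_neg (by omega), dif_neg (by omega)]

lemma fwdB_aux (ln : List Char) (k : Nat) (hk : k ≤ ln.length) (acc : List Int) :
    ((PySem.List.pyRange 0 (k:Int) 1).reverse).foldl
      (fun (st : Int × List Int) i =>
        let cur := if i + 1 < ((ln.length : Nat):Int) ∧ PySem.List.pyGetD ln (i + 1) ' ' = 'D' then i else st.1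
        (cur, st.2 ++ [cur])) (specFwd ln k, acc)
    = (specFwd ln 0, acc ++ ((List.range k).map (fun y => specFwd ln y)).reverse) := by
  induction k generalizing acc with
  | zero => simp
  | succ k ih =>
    have h1 : ((k+1:Nat):Int) = (k:Int)+1 := by push_cast; ring
    rw [h1, PySem.List.pyRange_one_succ_right (by positivity), List.reverse_append]
    simp only [List.reverse_singleton, List.singleton_append, List.foldl_cons]
    have hstep := step_fwd ln k hk
    simp only [hstep]
    rw [ih (by omega) (acc ++ [specFwd ln k])]
    simp [List.range_succ]

lemma fwdB_eq (ln : List Char) :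
    fwdB ln = (List.range ln.length).map (fun y => specFwd ln y) := by
  rw [fwdB]
  simp only []
  rw [← specFwd_len ln, fwdB_aux ln ln.length le_rfl []]
  simp

lemma step_bwd (ln : List Char) (k : Nat) (hk : k + 1 ≤ ln.length) :
    (if 1 ≤ (k:Int) ∧ PySem.List.pyGetD ln ((k:Int) - 1) ' ' = 'D'
      then (k:Int) else specBwd ln (k-1)) = specBwd ln k := by
  match k with
  | 0 => rw [if_neg (by omega)]
  | s+1 =>
    have hs : s < ln.length := by omega
    have hcast : ((s+1 : Nat):Int) - 1 = ((s:Nat):Int) := by push_cast; ring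
    rw [hcast, PySem.List.pyGetD_natCast, List.getD_eq_getElem ln ' ' hs]
    rw [show specBwd ln (s+1) = if getElem? ln s = some 'D' then ((s:Int)+1) else specBwd ln s from rfl,
      List.getElem?_eq_getElem hs]
    by_cases hD : ln[s] = 'D'
    · simp [hD]
    · simp [hD]

lemma bwdB_aux (ln : List Char) (k : Nat) (hk : k ≤ ln.length) (acc : List Int) :
    (PySem.List.pyRange 0 (k:Int) 1).foldl
      (fun (st : Int × List Int) i =>
        let cur := if 1 ≤ i ∧ PySem.List.pyGetD ln (i - 1) ' ' = 'D' then i else st.1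
        (cur, st.2 ++ [cur])) ((0:Int), acc)
    = (specBwd ln (k-1), acc ++ (List.range k).map (fun y => specBwd ln y)) := by
  induction k with
  | zero => simp [specBwd]
  | succ k ih =>
    have h1 : ((k+1:Nat):Int) = (k:Int)+1 := by push_cast; ring
    rw [h1, PySem.List.pyRange_one_succ_right (by positivity), List.foldl_append]
    rw [ih (by omega)]
    simp only [List.foldl_cons, List.foldl_nil]
    have hstep := step_bwd ln k hk
    simp only [hstep]
    simp [List.range_succ]

lemma bwdB_eq (ln : List Char) :
    bwdB ln = (List.range ln.length).map (fun y => specBwd ln y) := by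
  rw [bwdB]
  simp only []
  rw [bwdB_aux ln ln.length le_rfl []]
  simp

lemma specFwd_bounds (ln : List Char) (y : Nat) (hy : y < ln.length) :
    0 ≤ specFwd ln y ∧ specFwd ln y < (ln.length : Int) := by
  fun_induction specFwd ln y with
  | case1 y h hD => omega
  | case2 y h hD ih => exact ih h
  | case3 y h => omega

lemma specBwd_bounds (ln : List Char) (y : Nat) (hy : y < ln.length) :
    0 ≤ specBwd ln y ∧ specBwd ln y < (ln.length : Int) := by
  induction y with
  | zero => simp [specBwd]; omega
  | succ y ih =>
    rw [specBwd]
    split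
    · constructor <;> omega
    · exact ih (by omega)

lemma slide_right (b : List (List Char)) (r c : Nat)
    (fuel : Nat) (x : Int) (y : Nat) (hx0 : 0 ≤ x) (hxr : x < (r:Int)) (hy : y < c)
    (hrow : (PySem.List.pyGetD b x []).length = c) (hf : c - y ≤ fuel) :
    slideA b r c 0 1 x (y:Int) fuel = (x, specFwd (PySem.List.pyGetD b x []) y) := by
  induction fuel generalizing y with
  | zero => omega
  | succ fuel ih =>
    simp only [slideA, add_zero]
    have hcast : (y:Int) + 1 = ((y+1 : Nat) : Int) := by push_cast; ring
    have hget : pvGet2 b x ((y:Int)+1) = (PySem.List.pyGetD b x []).getD (y+1) ' ' := by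
      rw [pvGet2, hcast, PySem.List.pyGetD_natCast]
    by_cases hc : y + 1 < c
    · have hc' : y + 1 < (PySem.List.pyGetD b x []).length := by omega
      rw [hget, List.getD_eq_getElem _ ' ' hc']
      conv_rhs => rw [specFwd]
      rw [dif_pos hc', List.getElem?_eq_getElem hc']
      by_cases hD : (PySem.List.pyGetD b x [])[y+1] = 'D'
      · rw [if_pos ⟨hx0, hxr, by omega, by omega, hD⟩, if_pos (by simp [hD])]
      · rw [if_neg (fun hcc => hD hcc.2.2.2.2), if_neg (by omega), if_neg (by simp [hD]), hcast]
        exact ih (y+1) hc (by omega)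
    · rw [if_neg (by rintro ⟨-, -, -, h4, -⟩; omega),
        if_pos (Or.inr (Or.inr (Or.inr (by omega))))]
      conv_rhs => rw [specFwd]
      rw [dif_neg (by omega), hrow]
      simp only [Prod.mk.injEq, true_and]
      omega

lemma slide_left (b : List (List Char)) (r c : Nat)
    (fuel : Nat) (x : Int) (y : Nat) (hx0 : 0 ≤ x) (hxr : x < (r:Int)) (hy : y < c)
    (hrow : (PySem.List.pyGetD b x []).length = c) (hf : y + 1 ≤ fuel) :
    slideA b r c 0 (-1) x (y:Int) fuel = (x, specBwd (PySem.List.pyGetD b x []) y) := by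
  induction fuel generalizing y with
  | zero => omega
  | succ fuel ih =>
    simp only [slideA, add_zero]
    match y with
    | 0 =>
      rw [if_neg (by rintro ⟨-, -, h3, -⟩; simp at h3),
        if_pos (Or.inr (Or.inr (Or.inl (by simp))))]
      simp [specBwd]
    | s+1 =>
      have hcast : ((s+1:Nat):Int) + -1 = ((s:Nat):Int) := by push_cast; ring
      have hs : s < c := by omega
      have hs' : s < (PySem.List.pyGetD b x []).length := by omega
      rw [hcast]
      have hget : pvGet2 b x ((s:Nat):Int) = (PySem.List.pyGetD b x [])[s] := by
        rw [pvGet2, PySem.List.pyGetD_natCast, List.getD_eq_getElem _ ' ' hs']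
      rw [hget]
      rw [show specBwd (PySem.List.pyGetD b x []) (s+1)
            = if getElem? (PySem.List.pyGetD b x []) s = some 'D' then ((s:Int)+1)
              else specBwd (PySem.List.pyGetD b x []) s from rfl,
        List.getElem?_eq_getElem hs']
      by_cases hD : (PySem.List.pyGetD b x [])[s] = 'D'
      · rw [if_pos ⟨hx0, hxr, by omega, by omega, hD⟩, if_pos (by simp [hD])]
        simp only [Prod.mk.injEq, true_and]
        push_cast; ring
      · rw [if_neg (fun hcc => hD hcc.2.2.2.2), if_neg (by omega), if_neg (by simp [hD])]
        exact ih s hs (by omega)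

lemma slide_down (b : List (List Char)) (r c : Nat) (hr : b.length = r)
    (fuel : Nat) (x : Nat) (y : Int) (hx : x < r) (hy0 : 0 ≤ y) (hyc : y < (c:Int))
    (hf : r - x ≤ fuel) :
    slideA b r c 1 0 (x:Int) y fuel = (specFwd (colB b y) x, y) := by
  have hcol_len : (colB b y).length = r := by simp [colB, hr]
  induction fuel generalizing x with
  | zero => omega
  | succ fuel ih =>
    simp only [slideA, add_zero]
    have hcast : (x:Int) + 1 = ((x+1 : Nat) : Int) := by push_cast; ring
    by_cases hc : x + 1 < r
    · have hc' : x + 1 < (colB b y).length := by omega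
      have hcb : x + 1 < b.length := by omega
      have hget : pvGet2 b ((x:Int)+1) y = (colB b y)[x+1] := by
        rw [pvGet2, hcast, PySem.List.pyGetD_natCast, List.getD_eq_getElem _ [] hcb]
        simp [colB]
      rw [hget]
      conv_rhs => rw [specFwd]
      rw [dif_pos hc', List.getElem?_eq_getElem hc']
      by_cases hD : (colB b y)[x+1] = 'D'
      · rw [if_pos ⟨by omega, by omega, hy0, hyc, hD⟩, if_pos (by simp [hD])]
      · rw [if_neg (fun hcc => hD hcc.2.2.2.2), if_neg (by omega), if_neg (by simp [hD]), hcast]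
        exact ih (x+1) hc (by omega)
    · rw [if_neg (by rintro ⟨-, h2, -⟩; omega),
        if_pos (Or.inr (Or.inl (by omega)))]
      conv_rhs => rw [specFwd]
      rw [dif_neg (by omega), hcol_len]
      simp only [Prod.mk.injEq, and_true]
      omega

lemma slide_up (b : List (List Char)) (r c : Nat) (hr : b.length = r)
    (fuel : Nat) (x : Nat) (y : Int) (hx : x < r) (hy0 : 0 ≤ y) (hyc : y < (c:Int))
    (hf : x + 1 ≤ fuel) :
    slideA b r c (-1) 0 (x:Int) y fuel = (specBwd (colB b y) x, y) := by
  have hcol_len : (colB b y).length = r := by simp [colB, hr]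
  induction fuel generalizing x with
  | zero => omega
  | succ fuel ih =>
    simp only [slideA, add_zero]
    match x with
    | 0 =>
      rw [if_neg (by rintro ⟨h1, -⟩; simp at h1),
        if_pos (Or.inl (by simp))]
      simp [specBwd]
    | s+1 =>
      have hcast : ((s+1:Nat):Int) + -1 = ((s:Nat):Int) := by push_cast; ring
      have hs : s < r := by omega
      have hs' : s < (colB b y).length := by omega
      have hsb : s < b.length := by omega
      rw [hcast]
      have hget : pvGet2 b ((s:Nat):Int) y = (colB b y)[s] := by
        rw [pvGet2, PySem.List.pyGetD_natCast, List.getD_eq_getElem _ [] hsb]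
        simp [colB]
      rw [hget]
      rw [show specBwd (colB b y) (s+1)
            = if getElem? (colB b y) s = some 'D' then ((s:Int)+1)
              else specBwd (colB b y) s from rfl,
        List.getElem?_eq_getElem hs']
      by_cases hD : (colB b y)[s] = 'D'
      · rw [if_pos ⟨by omega, by omega, hy0, hyc, hD⟩, if_pos (by simp [hD])]
        simp only [Prod.mk.injEq, and_true]
        push_cast; ring
      · rw [if_neg (fun hcc => hD hcc.2.2.2.2), if_neg (by omega), if_neg (by simp [hD])]
        exact ih s hs (by omega)

lemma foldl_preserve {α β : Type} (P : α → Prop) (f : α → β → α) :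
    ∀ (l : List β) (init : α), P init → (∀ a x, x ∈ l → P a → P (f a x)) → P (l.foldl f init) := by
  intro l
  induction l with
  | nil => intro init h0 _; exact h0
  | cons x t ih =>
    intro init h0 hstep
    exact ih (f init x) (hstep init x (by simp) h0) (fun a z hz ha => hstep a z (by simp [hz]) ha)

-- B's four tables, as solution_alt builds them
def tabsB (b : List (List Char)) (c : Nat) : Int → Int → Int → Int × Int :=
  moveB (b.map fwdB) (b.map bwdB)
    (((PySem.List.pyRange 0 (c:Int) 1).map (colB b)).map fwdB)
    (((PySem.List.pyRange 0 (c:Int) 1).map (colB b)).map bwdB)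

lemma tab_fwd_get (ln : List Char) (y : Int) (hy0 : 0 ≤ y) (hy : y < (ln.length:Int)) :
    PySem.List.pyGetD (fwdB ln) y 0 = specFwd ln y.toNat := by
  have hlen : (fwdB ln).length = ln.length := by rw [fwdB_eq]; simp
  rw [PySem.List.pyGetD_eq_getElem _ 0 hy0 (by rw [hlen]; exact hy)]
  simp only [fwdB_eq, List.getElem_map, List.getElem_range]

lemma tab_bwd_get (ln : List Char) (y : Int) (hy0 : 0 ≤ y) (hy : y < (ln.length:Int)) :
    PySem.List.pyGetD (bwdB ln) y 0 = specBwd ln y.toNat := by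
  have hlen : (bwdB ln).length = ln.length := by rw [bwdB_eq]; simp
  rw [PySem.List.pyGetD_eq_getElem _ 0 hy0 (by rw [hlen]; exact hy)]
  simp only [bwdB_eq, List.getElem_map, List.getElem_range]

lemma map_tab_get (g : List Char → List Int) (b : List (List Char)) (x : Int)
    (hx0 : 0 ≤ x) (hxr : x < (b.length:Int)) :
    PySem.List.pyGetD (b.map g) x [] = g (b[x.toNat]'(by omega)) := by
  rw [PySem.List.pyGetD_eq_getElem _ [] hx0 (by simpa using hxr)]
  simp

lemma row_at (b : List (List Char)) (x : Int) (hx0 : 0 ≤ x) (hxr : x < (b.length:Int)) :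
    PySem.List.pyGetD b x [] = b[x.toNat]'(by omega) :=
  PySem.List.pyGetD_eq_getElem _ [] hx0 hxr

lemma move_eq (b : List (List Char)) (r c : Nat) (hr : b.length = r)
    (hrect : ∀ row ∈ b, row.length = c)
    (x y k : Int) (hin : InR r c (x, y)) (hk0 : 0 ≤ k) (hk4 : k < 4) :
    moveA b r c x y k = tabsB b c x y k ∧ InR r c (moveA b r c x y k) := by
  have hx0 : 0 ≤ x := hin.1
  have hxr : x < (r:Int) := hin.2.1
  have hy0 : 0 ≤ y := hin.2.2.1
  have hyc : y < (c:Int) := hin.2.2.2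
  have hxl : x.toNat < b.length := by omega
  have hrow : PySem.List.pyGetD b x [] = b[x.toNat] := row_at b x hx0 (by omega)
  have hrowlen : (b[x.toNat]).length = c := hrect _ (List.getElem_mem hxl)
  have hcol_len : (colB b y).length = r := by simp [colB, hr]
  have hyl : y.toNat < c := by omega
  have hrfl : (PySem.List.pyGetD b x []).length = c := by rw [hrow]; exact hrowlen
  have hcols : ∀ g : List Char → List Int,
      PySem.List.pyGetD (((PySem.List.pyRange 0 (c:Int) 1).map (colB b)).map g) y [] = g (colB b y) := by
    intro g
    rw [List.map_map]
    exact PySem.List.pyGetD_map_pyRange_of_nonneg _ (c:Int) y [] hy0 hyc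
  rcases (by omega : k = 0 ∨ k = 1 ∨ k = 2 ∨ k = 3) with rfl | rfl | rfl | rfl
  · -- right
    have hA : moveA b r c x y 0 = (x, specFwd (b[x.toNat]'hxl) y.toNat) := by
      simp only [moveA]
      rw [show PySem.List.pyGetD ([0,0,1,-1] : List Int) 0 0 = 0 from by decide,
        show PySem.List.pyGetD ([1,-1,0,0] : List Int) 0 0 = 1 from by decide,
        show y = ((y.toNat:Nat):Int) from by omega,
        slide_right b r c (r+c+2) x y.toNat hx0 hxr hyl hrfl (by omega), hrow]
      simp
      congr 1
      omega
    refine ⟨?_, ?_⟩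
    · rw [hA]
      simp only [tabsB, moveB]
      rw [pvGet2I, map_tab_get fwdB b x hx0 (by omega),
        tab_fwd_get _ y hy0 (by rw [hrowlen]; exact_mod_cast hyc)]
      simp
    · rw [hA]
      have hb := specFwd_bounds (b[x.toNat]) y.toNat (by omega)
      exact ⟨hx0, hxr, hb.1, by rw [hrowlen] at hb; exact_mod_cast hb.2⟩
  · -- left
    have hA : moveA b r c x y 1 = (x, specBwd (b[x.toNat]'hxl) y.toNat) := by
      simp only [moveA]
      rw [show PySem.List.pyGetD ([0,0,1,-1] : List Int) 1 0 = 0 from by decide,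
        show PySem.List.pyGetD ([1,-1,0,0] : List Int) 1 0 = -1 from by decide,
        show y = ((y.toNat:Nat):Int) from by omega,
        slide_left b r c (r+c+2) x y.toNat hx0 hxr hyl hrfl (by omega), hrow]
      simp
      congr 1
      omega
    refine ⟨?_, ?_⟩
    · rw [hA]
      simp only [tabsB, moveB, if_neg (by decide : ¬(1:Int) = 0)]
      rw [pvGet2I, map_tab_get bwdB b x hx0 (by omega),
        tab_bwd_get _ y hy0 (by rw [hrowlen]; exact_mod_cast hyc)]
      simp
    · rw [hA]
      have hb := specBwd_bounds (b[x.toNat]) y.toNat (by omega)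
      exact ⟨hx0, hxr, hb.1, by rw [hrowlen] at hb; exact_mod_cast hb.2⟩
  · -- down
    have hA : moveA b r c x y 2 = (specFwd (colB b y) x.toNat, y) := by
      simp only [moveA]
      rw [show PySem.List.pyGetD ([0,0,1,-1] : List Int) 2 0 = 1 from by decide,
        show PySem.List.pyGetD ([1,-1,0,0] : List Int) 2 0 = 0 from by decide,
        show x = ((x.toNat:Nat):Int) from by omega,
        slide_down b r c hr (r+c+2) x.toNat y (by omega) hy0 hyc (by omega)]
      simp
      congr 1
      omega
    refine ⟨?_, ?_⟩
    · rw [hA]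
      simp only [tabsB, moveB, if_neg (by decide : ¬(2:Int) = 0),
        if_neg (by decide : ¬(2:Int) = 1)]
      rw [pvGet2I, hcols fwdB, tab_fwd_get _ x hx0 (by rw [hcol_len]; exact_mod_cast hxr)]
      simp
    · rw [hA]
      have hb := specFwd_bounds (colB b y) x.toNat (by omega)
      exact ⟨hb.1, by rw [hcol_len] at hb; exact_mod_cast hb.2, hy0, hyc⟩
  · -- up
    have hA : moveA b r c x y 3 = (specBwd (colB b y) x.toNat, y) := by
      simp only [moveA]
      rw [show PySem.List.pyGetD ([0,0,1,-1] : List Int) 3 0 = -1 from by decide,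
        show PySem.List.pyGetD ([1,-1,0,0] : List Int) 3 0 = 0 from by decide,
        show x = ((x.toNat:Nat):Int) from by omega,
        slide_up b r c hr (r+c+2) x.toNat y (by omega) hy0 hyc (by omega)]
      simp
      congr 1
      omega
    refine ⟨?_, ?_⟩
    · rw [hA]
      simp only [tabsB, moveB, if_neg (by decide : ¬(3:Int) = 0),
        if_neg (by decide : ¬(3:Int) = 1), if_neg (by decide : ¬(3:Int) = 2)]
      rw [pvGet2I, hcols bwdB, tab_bwd_get _ x hx0 (by rw [hcol_len]; exact_mod_cast hxr)]
    · rw [hA]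
      have hb := specBwd_bounds (colB b y) x.toNat (by omega)
      exact ⟨hb.1, by rw [hcol_len] at hb; exact_mod_cast hb.2, hy0, hyc⟩

lemma bfsStep_congr (m1 m2 : Int → Int → Int → Int × Int) (x y k : Int)
    (st : List (Int × Int) × List (List Int)) (h : m1 x y k = m2 x y k) :
    bfsStep m1 x y st k = bfsStep m2 x y st k := by
  simp only [bfsStep, h]

lemma bfsStep_queue (P : Int × Int → Prop) (m : Int → Int → Int → Int × Int) (x y k : Int)
    (st : List (Int × Int) × List (List Int)) (hst : ∀ p ∈ st.1, P p) (hmv : P (m x y k)) :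
    ∀ p ∈ (bfsStep m x y st k).1, P p := by
  simp only [bfsStep]
  split
  · intro p hp
    rcases List.mem_append.1 hp with h | h
    · exact hst p h
    · rw [List.mem_singleton.1 h]; exact hmv
  · exact hst

lemma bfsLoop_congr (b : List (List Char)) (r c : Nat)
    (m1 m2 : Int → Int → Int → Int × Int)
    (hm : ∀ x y k, InR r c (x, y) → 0 ≤ k → k < 4 → m1 x y k = m2 x y k ∧ InR r c (m1 x y k)) :
    ∀ (fuel : Nat) (que : List (Int × Int)) (visited : List (List Int)),
      (∀ p ∈ que, InR r c p) →
      bfsLoop b m1 que visited fuel = bfsLoop b m2 que visited fuel := by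
  intro fuel
  induction fuel with
  | zero => intro que visited _; rfl
  | succ fuel ih =>
    intro que visited hq
    match que with
    | [] => rfl
    | (x, y) :: rest =>
      have hxy : InR r c (x, y) := hq _ List.mem_cons_self
      simp only [bfsLoop]
      have hks : ∀ k ∈ PySem.List.pyRange 0 4 1, m1 x y k = m2 x y k ∧ InR r c (m1 x y k) := by
        intro k hk
        rw [PySem.List.mem_pyRange_one] at hk
        exact hm x y k hxy hk.1 hk.2
      by_cases hg : pvGet2 b x y = 'G'
      · rw [if_pos hg, if_pos hg]
      · rw [if_neg hg, if_neg hg]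
        have hfold : (PySem.List.pyRange 0 4 1).foldl (bfsStep m1 x y) (rest, visited)
            = (PySem.List.pyRange 0 4 1).foldl (bfsStep m2 x y) (rest, visited) :=
          PySem.List.foldl_congr_mem _ _ _ _
            (fun acc k hk => bfsStep_congr m1 m2 x y k acc (hks k hk).1)
        rw [← hfold]
        exact ih _ _ (foldl_preserve (fun st => ∀ p ∈ st.1, InR r c p) (bfsStep m1 x y) _ _
          (fun p hp => hq p (List.mem_cons_of_mem _ hp))
          (fun a k hk ha => bfsStep_queue (InR r c) m1 x y k a ha (hks k hk).2))

lemma start_eq (b : List (List Char)) (c : Nat) (hrect : ∀ row ∈ b, row.length = c) :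
    startA b b.length c = startB b := by
  rw [startA, startB, PySem.List.enumerate_eq_map_pyRange b ([] : List Char),
    List.foldl_map, PySem.List.len_eq]
  refine PySem.List.foldl_congr_mem _ _ _ _ ?_
  intro acc i hi
  rw [PySem.List.mem_pyRange_one] at hi
  have hmem : PySem.List.pyGetD b i [] ∈ b :=
    PySem.List.pyGetD_mem b [] ⟨by omega, by omega⟩
  have hrowlen : ((PySem.List.pyGetD b i []).length : Int) = (c : Int) := by
    exact_mod_cast hrect _ hmem
  simp only []
  rw [PySem.List.enumerate_eq_map_pyRange (PySem.List.pyGetD b i []) ' ',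
    List.foldl_map, PySem.List.len_eq, hrowlen]
  rfl

lemma start_inner_bound (b : List (List Char)) (c : Nat) (i : Int) :
    ∀ j, ((PySem.List.pyRange 0 (c:Int) 1).foldl
      (fun acc j => if acc = none ∧ pvGet2 b i j = 'R' then some j else acc)
      (none : Option Int)) = some j → 0 ≤ j ∧ j < (c:Int) := by
  refine foldl_preserve (fun acc => ∀ j, acc = some j → 0 ≤ j ∧ j < (c:Int)) _ _ _ (by simp) ?_
  intro a' z hz pa' j hj'
  rw [PySem.List.mem_pyRange_one] at hz
  by_cases hcnd : a' = none ∧ pvGet2 b i z = 'R'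
  · rw [if_pos hcnd] at hj'
    cases hj'
    exact ⟨hz.1, hz.2⟩
  · rw [if_neg hcnd] at hj'
    exact pa' j hj'

lemma start_inR (b : List (List Char)) (r c : Nat) (hr0 : 0 < r) (hc0 : 0 < c) :
    InR r c (startA b r c) := by
  rw [startA]
  refine foldl_preserve (InR r c) _ _ _
    ⟨le_refl 0, by show (0:Int) < (r:Int); exact_mod_cast hr0, le_refl 0, by show (0:Int) < (c:Int); exact_mod_cast hc0⟩ ?_
  intro a i hi ha
  rw [PySem.List.mem_pyRange_one] at hi
  cases hE : (PySem.List.pyRange 0 (c:Int) 1).foldl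
      (fun acc j => if acc = none ∧ pvGet2 b i j = 'R' then some j else acc)
      (none : Option Int) with
  | none => exact ha
  | some j =>
    have hb := start_inner_bound b c i j hE
    exact ⟨hi.1, hi.2, hb.1, hb.2⟩

lemma str_len_eq (s : String) : PySem.Str.len s = (s.toList.length : Int) := by
  simp [PySem.Str.len]

-- verdict assembled at the bottom
theorem solution_spec : Claim_equal_solution := by
  unfold Claim_equal_solution
  intro board _ hpre
  unfold Spec_solution
  obtain ⟨hne, hc0, hrect⟩ := hpre
  simp only [solution, solution_alt]
  have hhead : PySem.List.pyGetD (board.map String.toList) 0 [] = (board.headD "").toList := by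
    cases board with
    | nil => exact absurd rfl hne
    | cons h0 t => simp [PySem.List.pyGetD_zero_cons]
  set bl := board.map String.toList with hbl
  set cN := (PySem.List.pyGetD bl 0 []).length with hcN
  have hc0' : 0 < cN := by
    rw [hcN, hhead]
    rw [str_len_eq] at hc0
    exact_mod_cast hc0
  have hr0 : 0 < bl.length := by
    rw [hbl]
    simpa using List.length_pos_iff.2 hne
  have hrect' : ∀ row ∈ bl, row.length = cN := by
    intro row hrow
    rw [hbl] at hrow
    obtain ⟨s, hs, rfl⟩ := List.mem_map.1 hrow
    have := hrect s hs
    rw [str_len_eq, str_len_eq] at this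
    rw [hcN, hhead]
    exact_mod_cast this
  rw [← start_eq bl cN hrect']
  have hmv := fun x y k hin hk0 hk4 =>
    move_eq bl bl.length cN rfl hrect' x y k hin hk0 hk4
  have hq : ∀ p ∈ [startA bl bl.length cN], InR bl.length cN p := by
    intro p hp
    rw [List.mem_singleton.1 hp]
    exact start_inR bl bl.length cN hr0 hc0'
  have hcong := bfsLoop_congr bl bl.length cN (moveA bl bl.length cN) (tabsB bl cN) hmv
    (bl.length * cN + 1) [startA bl bl.length cN]
    (pvSet2 (List.replicate bl.length (List.replicate cN 0))
      (startA bl bl.length cN).1 (startA bl bl.length cN).2 1) hq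
  simp only [tabsB] at hcong
  rw [hcong]
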